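-- pv_equiv track=rewrite | github.com/BaconPeeks/functional-pipeline | main.py | find_ac_pair
-- ===== SOURCE A (Python) =====
-- def find_ac_pair(b, c):
--     """
--     Finds integers m and n such that:
--     m * n = c
--     m+ n = b
--
--     :param b: the first coefficient of the quadratic equation
--     :param c: the second coefficient of the quadratic equation
--     """
--     for i in range(-abs(c), abs(c) + 1):
--         if i == 0:
--             continue
--         if c % i == 0:
--             j = c // i
--             if i + j == b:
--                 return i, j
--     return None
-- ===== SOURCE B (Python) =====
-- import math
--
-- def find_ac_pair(b, c):
--     """O(1): m and n are the roots of x^2 - b x + c = 0; take the discriminant."""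
--     if c == 0:
--         return None
--     d = b * b - 4 * c
--     if d < 0:
--         return None
--     s = math.isqrt(d)
--     if s * s != d:
--         return None
--     return (b - s) // 2, (b + s) // 2
-- ===== Notes on version B (the rewrite author's own statement) =====
-- stated objective: faster
-- what changed: Replaced A's linear scan over all candidate divisors in range(-|c|, |c|+1) by an O(1) quadratic-formula solution: compute the discriminant b*b-4*c, test it for being a non-negative perfect square with math.isqrt, and return the two integer roots ((b-s)//2, (b+s)//2) directly.
import Mathlib
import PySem

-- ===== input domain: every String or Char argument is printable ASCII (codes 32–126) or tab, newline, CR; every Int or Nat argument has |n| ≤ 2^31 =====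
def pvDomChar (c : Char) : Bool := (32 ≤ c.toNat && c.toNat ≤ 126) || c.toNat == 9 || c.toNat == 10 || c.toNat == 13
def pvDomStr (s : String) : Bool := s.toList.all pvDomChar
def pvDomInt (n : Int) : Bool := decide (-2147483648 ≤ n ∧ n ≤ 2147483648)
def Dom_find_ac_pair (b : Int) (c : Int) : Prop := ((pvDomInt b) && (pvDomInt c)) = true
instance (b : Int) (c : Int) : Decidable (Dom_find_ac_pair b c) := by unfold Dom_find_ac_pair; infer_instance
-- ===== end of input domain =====

-- B replaces A's O(|c|) divisor scan by the O(1) discriminant of x² - b·x + c (perfect-square test + integer roots).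

-- ===== PORT A =====
-- loop body of A's `for i in range(-abs(c), abs(c)+1)` (early `return` = findSome?)
def pvAInner (b : Int) (c : Int) (i : Int) : Option (List Int) :=
  if i = 0 then none
  else if PySem.Int.mod c i = 0 then
    if i + PySem.Int.floordiv c i = b then some [i, PySem.Int.floordiv c i] else none
  else none

def find_ac_pair (b : Int) (c : Int) : Option (List Int) :=
  (PySem.List.pyRange (-|c|) (|c| + 1) 1).findSome? (pvAInner b c)

-- ===== PORT B =====
def find_ac_pair_alt (b : Int) (c : Int) : Option (List Int) :=
  if c = 0 then none
  else if b * b - 4 * c < 0 then none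
  else if ((Nat.sqrt (b * b - 4 * c).toNat : Int)) * (Nat.sqrt (b * b - 4 * c).toNat : Int)
            ≠ b * b - 4 * c then none
  else some [PySem.Int.floordiv (b - (Nat.sqrt (b * b - 4 * c).toNat : Int)) 2,
             PySem.Int.floordiv (b + (Nat.sqrt (b * b - 4 * c).toNat : Int)) 2]

-- ===== PRECONDITION & SPEC =====
def Spec_find_ac_pair (b : Int) (c : Int) (out : Option (List Int)) : Prop := out = find_ac_pair_alt b c
instance (b : Int) (c : Int) (out : Option (List Int)) : Decidable (Spec_find_ac_pair b c out) := by unfold Spec_find_ac_pair; infer_instance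

-- ===== CLAIM (what is proved, stated in full; the proofs are below) =====
def Claim_equal_find_ac_pair : Prop := ∀ (b : Int) (c : Int), Dom_find_ac_pair b c → Spec_find_ac_pair b c (find_ac_pair b c)

-- ===== LEMMAS AND PROOFS =====

-- x² has the parity of x
theorem pv_sq_emod_two (x : Int) : x * x % 2 = x % 2 := by
  rw [Int.mul_emod]
  have h0 : 0 ≤ x % 2 := Int.emod_nonneg x (by norm_num)
  have h1 : x % 2 < 2 := Int.emod_lt_of_pos x (by norm_num)
  interval_cases h : x % 2 <;> norm_num

-- the loop body is `none` off the roots of x² - b·x + c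
theorem pvAInner_eq_none (b c i : Int) (h : i = 0 ∨ i * i - b * i + c ≠ 0) :
    pvAInner b c i = none := by
  unfold pvAInner
  by_cases h0 : i = 0
  · simp [h0]
  · rcases h with h | hq
    · exact absurd h h0
    simp only [h0, if_false]
    split_ifs with hm hs
    · exfalso
      have hdvd : i ∣ c := (PySem.Int.mod_eq_zero_iff_dvd c i).mp hm
      obtain ⟨k, hk⟩ := hdvd
      have hfd : PySem.Int.floordiv c i = k := by
        rw [hk, PySem.Int.floordiv]
        exact Int.mul_fdiv_cancel_left k h0
      rw [hfd] at hs
      apply hq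
      have hkb : k = b - i := by omega
      rw [hk, hkb]; ring
    · rfl
    · rfl

-- the loop body at a nonzero root
theorem pvAInner_root (b c i : Int) (h0 : i ≠ 0) (hq : i * i - b * i + c = 0) :
    pvAInner b c i = some [i, b - i] := by
  have hk : c = i * (b - i) := by linear_combination hq
  have hdvd : i ∣ c := ⟨b - i, hk⟩
  have hfd : PySem.Int.floordiv c i = b - i := by
    rw [hk, PySem.Int.floordiv]
    exact Int.mul_fdiv_cancel_left _ h0
  unfold pvAInner
  rw [if_neg h0, if_pos ((PySem.Int.mod_eq_zero_iff_dvd c i).mpr hdvd), hfd,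
    if_pos (by ring)]

-- find-first over an ascending integer range
theorem pv_findSome_first {α : Type} (f : Int → Option α) (a b r : Int) (v : α)
    (h1 : a ≤ r) (h2 : r < b) (hr : f r = some v)
    (hn : ∀ j, a ≤ j → j < r → f j = none) :
    (PySem.List.pyRange a b 1).findSome? f = some v := by
  rw [PySem.List.pyRange_one_append a r b h1 (le_of_lt h2), List.findSome?_append]
  have hnone : (PySem.List.pyRange a r 1).findSome? f = none := by
    rw [List.findSome?_eq_none_iff]
    intro j hj
    rw [PySem.List.mem_pyRange_one] at hj
    exact hn j hj.1 hj.2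
  rw [hnone, PySem.List.pyRange_one_cons h2]
  simp [hr]

theorem find_ac_pair_eq (b c : Int) : find_ac_pair b c = find_ac_pair_alt b c := by
  by_cases hc : c = 0
  · subst hc
    have hr : PySem.List.pyRange (-|(0:Int)|) (|(0:Int)| + 1) 1 = [0] := by decide
    unfold find_ac_pair find_ac_pair_alt
    rw [hr]
    rfl
  · by_cases hroot : ∃ i, i * i - b * i + c = 0
    · -- a root exists: both sides return the two roots, smaller one first
      obtain ⟨i₀, hi₀⟩ := hroot
      set d : Int := b * b - 4 * c with hd
      have hdsq : d = (b - 2 * i₀) * (b - 2 * i₀) := by linear_combination (-4 : Int) * hi₀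
      set s : Int := (Nat.sqrt d.toNat : Int) with hs
      have hss : s * s = d := by
        have h1 : d.toNat = (b - 2 * i₀).natAbs * (b - 2 * i₀).natAbs := by
          have h := Int.natAbs_mul_self (a := b - 2 * i₀)
          omega
        have h2 : Nat.sqrt d.toNat = (b - 2 * i₀).natAbs := by
          rw [h1, Nat.sqrt_eq]
        rw [hs, h2]
        push_cast
        rw [abs_mul_abs_self]
        omega
      have hs0 : 0 ≤ s := by positivity
      -- b and s have the same parity, so the roots are integers
      have hpar : (b - s) % 2 = 0 := by
        have e1 := pv_sq_emod_two s
        have e2 := pv_sq_emod_two b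
        omega
      obtain ⟨r1, hr1⟩ : ∃ r1, b - s = 2 * r1 := ⟨(b - s) / 2, by omega⟩
      set r2 : Int := b - r1 with hr2
      have hbs : b + s = 2 * r2 := by omega
      have hprod : r1 * r2 = c := by
        have e : (b - s) * (b + s) = 4 * (r1 * r2) := by rw [hr1, hbs]; ring
        have e2 : (b - s) * (b + s) = b * b - s * s := by ring
        omega
      have hr1n : r1 ≠ 0 := by rintro rfl; rw [zero_mul] at hprod; exact hc hprod.symm
      have hr2n : r2 ≠ 0 := by intro h; rw [h, mul_zero] at hprod; exact hc hprod.symm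
      have hle : r1 ≤ r2 := by omega
      -- both roots lie in [-|c|, |c|]
      have hna : r1.natAbs ≤ c.natAbs := by
        have hm : r1.natAbs * r2.natAbs = c.natAbs := by rw [← Int.natAbs_mul, hprod]
        have h2 : 1 ≤ r2.natAbs := by omega
        calc r1.natAbs = r1.natAbs * 1 := (Nat.mul_one _).symm
          _ ≤ r1.natAbs * r2.natAbs := Nat.mul_le_mul (Nat.le_refl _) h2
          _ = c.natAbs := hm
      have hquad : r1 * r1 - b * r1 + c = 0 := by linear_combination r1 * hr2 - hprod
      have hA : find_ac_pair b c = some [r1, r2] := by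
        unfold find_ac_pair
        have hf := pv_findSome_first (pvAInner b c) (-|c|) (|c| + 1) r1 [r1, b - r1]
          (by rw [Int.abs_eq_natAbs]; omega) (by rw [Int.abs_eq_natAbs]; omega)
          (pvAInner_root b c r1 hr1n hquad)
          (fun j hja hjr => by
            apply pvAInner_eq_none
            by_cases hj0 : j = 0
            · exact Or.inl hj0
            · right
              intro hq
              have hfac : (j - r1) * (j - r2) = 0 := by
                linear_combination hq + hprod - j * hr2
              rcases mul_eq_zero.mp hfac with h | h <;> omega)
        rw [hf, hr2]
      have hB : find_ac_pair_alt b c = some [r1, r2] := by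
        have hd0 : 0 ≤ d := by rw [← hss]; exact mul_nonneg hs0 hs0
        have hcond : (Nat.sqrt ((b * b - 4 * c).toNat) : Int) *
            (Nat.sqrt ((b * b - 4 * c).toNat) : Int) = b * b - 4 * c := by
          rw [← hd, ← hs]; exact hss
        unfold find_ac_pair_alt
        rw [if_neg hc, if_neg (show ¬ (b * b - 4 * c < 0) by omega),
          if_neg (not_not_intro hcond)]
        rw [← hd, ← hs]
        have e1 : PySem.Int.floordiv (b - s) 2 = r1 := by
          rw [PySem.Int.floordiv_eq_ediv_of_pos (by norm_num), hr1,
            Int.mul_ediv_cancel_left _ (by norm_num)]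
        have e2 : PySem.Int.floordiv (b + s) 2 = r2 := by
          rw [PySem.Int.floordiv_eq_ediv_of_pos (by norm_num), hbs,
            Int.mul_ediv_cancel_left _ (by norm_num)]
        rw [e1, e2]
      rw [hA, hB]
    · -- no root: both sides return none
      push Not at hroot
      have hA : find_ac_pair b c = none := by
        unfold find_ac_pair
        rw [List.findSome?_eq_none_iff]
        intro j hj
        exact pvAInner_eq_none b c j (Or.inr (hroot j))
      rw [hA]
      unfold find_ac_pair_alt
      rw [if_neg hc]
      set d : Int := b * b - 4 * c with hd
      by_cases hdlt : d < 0
      · rw [if_pos hdlt]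
      · rw [if_neg hdlt]
        set s : Int := (Nat.sqrt d.toNat : Int) with hs
        by_cases hsq : s * s = d
        · exfalso
          -- a perfect-square discriminant forces an integer root
          have hpar : (b - s) % 2 = 0 := by
            have e1 := pv_sq_emod_two s
            have e2 := pv_sq_emod_two b
            omega
          obtain ⟨r1, hr1⟩ : ∃ r1, b - s = 2 * r1 := ⟨(b - s) / 2, by omega⟩
          have hs' : s = b - 2 * r1 := by omega
          have h4 : 4 * (r1 * r1) - 4 * (b * r1) + 4 * c = 0 := by
            rw [hs'] at hsq
            linear_combination hsq + hd
          exact hroot r1 (by omega)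
        · rw [if_pos hsq]

-- ===== VERDICT (by name: the statement is the Claim_ definition above) =====
theorem find_ac_pair_spec : Claim_equal_find_ac_pair := by
  intro b c _
  unfold Spec_find_ac_pair
  exact find_ac_pair_eq b c
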